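-- pv_equiv track=rewrite | github.com/geezdock/JARVIS | backend/app/api/routes.py | _derive_context_tags
-- ===== SOURCE A (Python) =====
-- def _derive_context_tags(keyword_set: set[str]) -> set[str]:
--     tag_rules = {
--         "python": {"hashmap", "arrays", "dp"},
--         "javascript": {"strings", "arrays", "stack"},
--         "typescript": {"strings", "arrays", "stack"},
--         "react": {"strings", "stack", "arrays"},
--         "node": {"hashmap", "graph"},
--         "sql": {"prefix-sum", "hashmap", "arrays"},
--         "postgres": {"prefix-sum", "hashmap"},
--         "api": {"hashmap", "design"},
--         "microservices": {"design", "graph"},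
--         "redis": {"design", "hashmap"},
--         "cache": {"design", "linked-list", "hashmap"},
--         "search": {"binary-search", "arrays"},
--         "analytics": {"prefix-sum", "heap", "arrays"},
--         "etl": {"arrays", "hashmap", "heap"},
--         "data": {"arrays", "heap", "graph"},
--         "ml": {"dp", "heap", "graph"},
--         "machine": {"dp", "heap", "graph"},
--         "graph": {"graph", "dfs", "bfs"},
--         "tree": {"dfs", "bfs"},
--         "dynamic": {"dp"},
--         "testing": {"stack", "arrays", "strings"},
--         "quality": {"stack", "arrays", "strings"},
--     }
--
--     tags: set[str] = set()
--     for keyword in keyword_set: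
--         tags.update(tag_rules.get(keyword, set()))
--     return tags
-- ===== SOURCE B (Python) =====
-- # B: inverted index tag -> trigger keywords (the transpose of A's tag_rules);
-- # for each keyword we scan the inverted table and collect every tag whose
-- # trigger set contains it -- no keyword->tags mapping exists anywhere.
--
-- _TAG_TO_KEYWORDS = {
--     "hashmap": {"python", "node", "sql", "postgres", "api", "redis", "cache", "etl"},
--     "arrays": {"python", "javascript", "typescript", "react", "sql", "search",
--                "analytics", "etl", "data", "testing", "quality"},
--     "dp": {"python", "ml", "machine", "dynamic"},
--     "strings": {"javascript", "typescript", "react", "testing", "quality"},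
--     "stack": {"javascript", "typescript", "react", "testing", "quality"},
--     "graph": {"node", "microservices", "data", "ml", "machine", "graph"},
--     "prefix-sum": {"sql", "postgres", "analytics"},
--     "design": {"api", "microservices", "redis", "cache"},
--     "linked-list": {"cache"},
--     "binary-search": {"search"},
--     "heap": {"analytics", "etl", "data", "ml", "machine"},
--     "dfs": {"graph", "tree"},
--     "bfs": {"graph", "tree"},
-- }
--
--
-- def _derive_context_tags(keyword_set: set[str]) -> set[str]:
--     tags: set[str] = set()
--     for keyword in keyword_set:
--         for tag, triggers in _TAG_TO_KEYWORDS.items():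
--             if keyword in triggers:
--                 tags.add(tag)
--     return tags
-- ===== Notes on version B (the rewrite author's own statement) =====
-- stated objective: alternative
-- what changed: B replaces A's forward keyword->tags table and per-keyword union with the transposed inverted index tag->trigger-keywords: for each keyword it scans the inverted table and adds every tag whose trigger set contains the keyword, so no keyword->tags mapping exists and the inner step is a membership test over the transpose instead of a dict lookup and set union.
import Mathlib
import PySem

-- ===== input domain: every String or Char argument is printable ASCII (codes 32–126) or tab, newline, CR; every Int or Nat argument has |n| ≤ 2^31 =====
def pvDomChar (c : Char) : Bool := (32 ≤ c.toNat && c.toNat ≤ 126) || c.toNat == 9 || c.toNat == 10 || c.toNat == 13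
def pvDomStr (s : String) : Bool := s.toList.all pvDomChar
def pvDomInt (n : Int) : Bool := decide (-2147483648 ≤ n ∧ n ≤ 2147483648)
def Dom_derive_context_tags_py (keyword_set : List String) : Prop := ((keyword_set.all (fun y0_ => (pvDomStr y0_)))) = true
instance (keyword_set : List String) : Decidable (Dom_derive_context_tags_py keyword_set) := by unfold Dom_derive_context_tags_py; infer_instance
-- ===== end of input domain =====

-- B replaces A's forward keyword->tags table with the inverted index tag->trigger-keywords
-- and collects, per keyword, every tag whose trigger set contains it; same set returned.

-- ===== PORT A =====
-- tag_rules: Python dict of SET literals. Python's iteration order over a set is not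
-- modelled (hash order), so each set literal is a nodup list in a fixed order of our
-- choosing (tags ordered by first appearance in the source); exact as a set.
def pvTagRules : PySem.Dict String (List String) := PySem.Dict.mk [
  ("python", ["hashmap", "arrays", "dp"]),
  ("javascript", ["arrays", "strings", "stack"]),
  ("typescript", ["arrays", "strings", "stack"]),
  ("react", ["arrays", "strings", "stack"]),
  ("node", ["hashmap", "graph"]),
  ("sql", ["hashmap", "arrays", "prefix-sum"]),
  ("postgres", ["hashmap", "prefix-sum"]),
  ("api", ["hashmap", "design"]),
  ("microservices", ["graph", "design"]),
  ("redis", ["hashmap", "design"]),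
  ("cache", ["hashmap", "design", "linked-list"]),
  ("search", ["arrays", "binary-search"]),
  ("analytics", ["arrays", "prefix-sum", "heap"]),
  ("etl", ["hashmap", "arrays", "heap"]),
  ("data", ["arrays", "graph", "heap"]),
  ("ml", ["dp", "graph", "heap"]),
  ("machine", ["dp", "graph", "heap"]),
  ("graph", ["graph", "dfs", "bfs"]),
  ("tree", ["dfs", "bfs"]),
  ("dynamic", ["dp"]),
  ("testing", ["arrays", "strings", "stack"]),
  ("quality", ["arrays", "strings", "stack"])]

-- tags = set(); for keyword in keyword_set: tags.update(tag_rules.get(keyword, set())); return tags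
def derive_context_tags_py (keyword_set : List String) : List String :=
  keyword_set.foldl (fun tags kw => PySem.Set.update tags (PySem.Dict.getD pvTagRules kw [])) []

-- ===== PORT B =====
-- _TAG_TO_KEYWORDS: dict of set literals; each trigger set is a nodup list (set order unmodelled).
def pvTagToKeywords : PySem.Dict String (List String) := PySem.Dict.mk [
  ("hashmap", ["python", "node", "sql", "postgres", "api", "redis", "cache", "etl"]),
  ("arrays", ["python", "javascript", "typescript", "react", "sql", "search",
              "analytics", "etl", "data", "testing", "quality"]),
  ("dp", ["python", "ml", "machine", "dynamic"]),
  ("strings", ["javascript", "typescript", "react", "testing", "quality"]),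
  ("stack", ["javascript", "typescript", "react", "testing", "quality"]),
  ("graph", ["node", "microservices", "data", "ml", "machine", "graph"]),
  ("prefix-sum", ["sql", "postgres", "analytics"]),
  ("design", ["api", "microservices", "redis", "cache"]),
  ("linked-list", ["cache"]),
  ("binary-search", ["search"]),
  ("heap", ["analytics", "etl", "data", "ml", "machine"]),
  ("dfs", ["graph", "tree"]),
  ("bfs", ["graph", "tree"])]

-- tags = set(); for keyword in keyword_set:
--   for tag, triggers in _TAG_TO_KEYWORDS.items():
--     if keyword in triggers: tags.add(tag)
-- return tags
def derive_context_tags_py_alt (keyword_set : List String) : List String :=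
  keyword_set.foldl (fun tags kw =>
    (PySem.Dict.items pvTagToKeywords).foldl (fun t p =>
      if PySem.Set.contains p.2 kw then PySem.Set.add t p.1 else t) tags) []

-- ===== PRECONDITION & SPEC =====
def Spec_derive_context_tags_py (keyword_set : List String) (out : List String) : Prop := out = derive_context_tags_py_alt keyword_set
instance (keyword_set : List String) (out : List String) : Decidable (Spec_derive_context_tags_py keyword_set out) := by unfold Spec_derive_context_tags_py; infer_instance

-- ===== CLAIM (what is proved, stated in full; the proofs are below) =====
def Claim_equal_derive_context_tags_py : Prop := ∀ (keyword_set : List String), Dom_derive_context_tags_py keyword_set → Spec_derive_context_tags_py keyword_set (derive_context_tags_py keyword_set)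

-- ===== LEMMAS AND PROOFS =====

-- the 22 keywords that appear in the rule table
def pvKeys : List String :=
  ["python", "javascript", "typescript", "react", "node", "sql", "postgres", "api",
   "microservices", "redis", "cache", "search", "analytics", "etl", "data", "ml",
   "machine", "graph", "tree", "dynamic", "testing", "quality"]

-- one loop step of A equals one loop step of B, for every keyword and accumulator
set_option maxRecDepth 4096 in
set_option maxHeartbeats 1000000 in
theorem pv_step_eq (kw : String) (tags : List String) :
    PySem.Set.update tags (PySem.Dict.getD pvTagRules kw []) =
      (PySem.Dict.items pvTagToKeywords).foldl (fun t p =>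
        if PySem.Set.contains p.2 kw then PySem.Set.add t p.1 else t) tags := by
  by_cases h : kw ∈ pvKeys
  · simp only [pvKeys, List.mem_cons, List.not_mem_nil, or_false] at h
    rcases h with rfl|rfl|rfl|rfl|rfl|rfl|rfl|rfl|rfl|rfl|rfl|rfl|rfl|rfl|rfl|rfl|rfl|rfl|rfl|rfl|rfl|rfl <;> rfl
  · simp only [pvKeys, List.mem_cons, List.not_mem_nil, or_false, not_or] at h
    obtain ⟨h1,h2,h3,h4,h5,h6,h7,h8,h9,h10,h11,h12,h13,h14,h15,h16,h17,h18,h19,h20,h21,h22⟩ := h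
    have hc : PySem.Dict.contains pvTagRules kw = false := by
      simp [pvTagRules, Ne.symm h1, Ne.symm h2, Ne.symm h3, Ne.symm h4,
        Ne.symm h5, Ne.symm h6, Ne.symm h7, Ne.symm h8, Ne.symm h9, Ne.symm h10, Ne.symm h11,
        Ne.symm h12, Ne.symm h13, Ne.symm h14, Ne.symm h15, Ne.symm h16, Ne.symm h17,
        Ne.symm h18, Ne.symm h19, Ne.symm h20, Ne.symm h21, Ne.symm h22]
    rw [PySem.Dict.getD_of_not_contains pvTagRules [] hc]
    simp [pvTagToKeywords, PySem.Set.contains, PySem.Set.update,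
      h1,h2,h3,h4,h5,h6,h7,h8,h9,h10,h11,h12,h13,h14,h15,h16,h17,h18,h19,h20,h21,h22]

-- ===== VERDICT (by name: the statement is the Claim_ definition above) =====
theorem derive_context_tags_py_spec : Claim_equal_derive_context_tags_py := by
  intro ks _
  unfold Spec_derive_context_tags_py derive_context_tags_py derive_context_tags_py_alt
  induction ks using List.reverseRecOn with
  | nil => rfl
  | append_singleton xs x ih => simp only [List.foldl_append, List.foldl_cons, List.foldl_nil, pv_step_eq]
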